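-- pv_equiv track=rewrite | github.com/aiverify-foundation/moonshot | moonshot/src/utils/pagination.py | get_paginated_lists
-- ===== SOURCE A (Python) =====
-- def get_paginated_lists(page_size: int, list_of_items: list) -> list:
--     """
--     Splits a list of items into a list of lists, each containing a maximum of `page_size` items.
--
--     Args:
--         page_size (int): The number of items per page.
--         list_of_items (list): The list of items to be paginated.
--
--     Returns:
--         list: A list of lists, where each sublist contains up to `page_size` items.
--
--     Raises:
--         RuntimeError: If `page_size` is not provided or is invalid.
--     """
--
--     if not page_size:
--         raise RuntimeError("Unable to get page_size for pagination.")
--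
--     # Break list_of_items into a list of lists, each of size page_size
--     paginated_items = [
--         list_of_items[i : i + page_size]
--         for i in range(0, len(list_of_items), page_size)
--     ]
--
--     return paginated_items
-- ===== SOURCE B (Python) =====
-- def get_paginated_lists(page_size: int, list_of_items: list) -> list:
--     if not page_size:
--         raise RuntimeError("Unable to get page_size for pagination.")
--
--     # Single pass: accumulate items one by one into the current chunk,
--     # flushing it whenever it reaches page_size.
--     paginated_items = []
--     current = []
--     for item in list_of_items:
--         current.append(item)
--         if len(current) == page_size:
--             paginated_items.append(current)
--             current = []
--     if current:
--         paginated_items.append(current)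
--     return paginated_items
-- ===== Notes on version B (the rewrite author's own statement) =====
-- stated objective: alternative
-- what changed: Replaces the strided-range slicing comprehension with a single per-element accumulation loop that flushes the current chunk whenever it reaches page_size.
-- outside the precondition, e.g. on get_paginated_lists(-2, [1, 2, 3]): A returns [], B returns [[1, 2, 3]]
import Mathlib
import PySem

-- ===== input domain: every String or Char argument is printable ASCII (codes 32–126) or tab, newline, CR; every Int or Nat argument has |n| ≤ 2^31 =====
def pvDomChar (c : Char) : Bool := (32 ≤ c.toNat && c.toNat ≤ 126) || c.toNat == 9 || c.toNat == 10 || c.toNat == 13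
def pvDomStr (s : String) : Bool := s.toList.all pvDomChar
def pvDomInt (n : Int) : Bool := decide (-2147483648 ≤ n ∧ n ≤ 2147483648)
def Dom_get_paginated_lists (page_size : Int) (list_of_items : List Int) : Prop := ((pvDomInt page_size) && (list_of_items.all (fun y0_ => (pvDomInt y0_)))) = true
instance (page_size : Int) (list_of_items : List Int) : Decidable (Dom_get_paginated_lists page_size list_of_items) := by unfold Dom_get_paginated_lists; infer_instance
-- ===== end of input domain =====

-- B replaces A's strided-range slicing comprehension with a single per-element
-- accumulation loop (objective: alternative decomposition, same O(n) cost).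


-- ===== PORT A =====
-- A: comprehension over range(0, len(list_of_items), page_size) taking slices
-- list_of_items[i : i + page_size].  (A's `if not page_size: raise RuntimeError`
-- guard is the page_size = 0 case, excluded by Pre_.)
def get_paginated_lists (page_size : Int) (list_of_items : List Int) : List (List Int) :=
  (PySem.List.pyRange 0 (list_of_items.length : Int) page_size).map
    (fun i => PySem.List.slice list_of_items (some i) (some (i + page_size)))

-- ===== PORT B =====
-- B: one pass, appending each item to `current` and flushing it into the result
-- whenever it reaches page_size; a non-empty leftover `current` is appended at the end.
def get_paginated_lists_alt (page_size : Int) (list_of_items : List Int) : List (List Int) :=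
  let st := list_of_items.foldl
    (fun (acc : List (List Int) × List Int) item =>
      let current := acc.2 ++ [item]
      if (current.length : Int) = page_size then (acc.1 ++ [current], ([] : List Int))
      else (acc.1, current))
    (([] : List (List Int)), ([] : List Int))
  if st.2 = [] then st.1 else st.1 ++ [st.2]

-- ===== PRECONDITION & SPEC =====
-- Pre_ excludes page_size ≤ 0: at page_size = 0 both A and B raise RuntimeError;
-- for negative page_size A's empty result (empty stride range) and B's whole-list
-- single chunk are both accidental values on a nonsensical page size.
def Pre_get_paginated_lists (page_size : Int) (list_of_items : List Int) : Prop :=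
  1 ≤ page_size
instance (page_size : Int) (list_of_items : List Int) : Decidable (Pre_get_paginated_lists page_size list_of_items) := by unfold Pre_get_paginated_lists; infer_instance

def pvWitness_get_paginated_lists : Int × List Int := (2, [1, 2, 3])

def Spec_get_paginated_lists (page_size : Int) (list_of_items : List Int) (out : List (List Int)) : Prop := out = get_paginated_lists_alt page_size list_of_items
instance (page_size : Int) (list_of_items : List Int) (out : List (List Int)) : Decidable (Spec_get_paginated_lists page_size list_of_items out) := by unfold Spec_get_paginated_lists; infer_instance

-- ===== CLAIM (what is proved, stated in full; the proofs are below) =====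
def Claim_equal_get_paginated_lists : Prop := ∀ (page_size : Int) (list_of_items : List Int), Dom_get_paginated_lists page_size list_of_items → Pre_get_paginated_lists page_size list_of_items → Spec_get_paginated_lists page_size list_of_items (get_paginated_lists page_size list_of_items)

-- ===== LEMMAS AND PROOFS =====

-- range(0, b, s) for 0 < s unrolls one step and shifts the remaining range by s.
lemma pyRange_pos_cons (b s : Int) (hs : 0 < s) :
    PySem.List.pyRange 0 b s =
      if 0 < b then 0 :: (PySem.List.pyRange 0 (b - s) s).map (· + s) else [] := by
  rw [PySem.List.pyRange_of_pos _ _ hs, PySem.List.pyRange_of_pos _ _ hs]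
  by_cases hb : 0 < b
  · simp only [if_pos hb, show (0:Int) < b - s ↔ s < b from by omega]
    have hdiv : (b - 0 + s - 1) / s = (b - 1) / s + 1 := by
      have := Int.add_mul_ediv_right (b - 1) 1 (by omega : s ≠ 0)
      rw [one_mul] at this
      rw [show b - 0 + s - 1 = b - 1 + s from by ring, this]
    have hq : 0 ≤ (b - 1) / s := Int.ediv_nonneg (by omega) (by omega)
    have hcount : ((b - 0 + s - 1) / s).toNat
        = (if s < b then ((b - s - 0 + s - 1) / s).toNat else 0) + 1 := by
      by_cases hsb : s < b
      · simp only [if_pos hsb]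
        rw [show b - s - 0 + s - 1 = b - 1 from by ring, hdiv]
        omega
      · simp only [if_neg hsb]
        have h0 : (b - 1) / s = 0 := Int.ediv_eq_zero_of_lt (by omega) (by omega)
        rw [show b - 0 + s - 1 = b - 1 + s from by ring]
        rw [show (b - 1 + s) = (b-1) + 1*s from by ring, Int.add_mul_ediv_right _ _ (by omega : s ≠ 0), h0]
        omega
    rw [hcount, List.range_succ_eq_map]
    simp only [List.map_cons, List.map_map]
    congr 1
    · norm_num
    · apply List.map_congr_left
      intro k _
      simp only [Function.comp_apply, Nat.succ_eq_add_one]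
      push_cast
      ring
  · simp [if_neg hb]

-- A on the empty list is the empty list.
lemma A_nil (s : Int) (hs : 1 ≤ s) : get_paginated_lists s [] = [] := by
  simp [get_paginated_lists, pyRange_pos_cons _ _ (by omega : (0:Int) < s)]

-- A satisfies the canonical chunking recurrence: first chunk, then A on the rest.
lemma A_rec (s : Int) (hs : 1 ≤ s) (l : List Int) (hl : l ≠ []) :
    get_paginated_lists s l = l.take s.toNat :: get_paginated_lists s (l.drop s.toNat) := by
  have hlen : 0 < (l.length : Int) := by
    have := List.length_pos_iff.mpr hl
    exact_mod_cast this
  unfold get_paginated_lists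
  rw [pyRange_pos_cons _ _ (by omega : (0:Int) < s), if_pos hlen]
  rw [List.map_cons, List.map_map]
  congr 1
  · rw [zero_add]
    simp only [PySem.List.slice_zero_start]
    exact PySem.List.slice_to l (by omega)
  · have hranges : PySem.List.pyRange 0 ((l.length : Int) - s) s
        = PySem.List.pyRange 0 (((l.drop s.toNat).length : Int)) s := by
      have hd : (((l.drop s.toNat).length : Int)) = max ((l.length : Int) - s) 0 := by
        simp [List.length_drop]; omega
      by_cases hsb : s < (l.length : Int)
      · rw [hd]
        congr 1
        omega
      · have h2 : ¬ (0:Int) < (((l.drop s.toNat).length : Int)) := by rw [hd]; omega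
        rw [PySem.List.pyRange_of_pos _ _ (by omega : (0:Int) < s),
            PySem.List.pyRange_of_pos _ _ (by omega : (0:Int) < s),
            if_neg (by omega : ¬ (0:Int) < (l.length : Int) - s), if_neg h2]
    rw [← hranges]
    apply List.map_congr_left
    intro i hi
    have hi0 : 0 ≤ i := by
      rcases (PySem.List.mem_pyRange_iff_of_pos (by omega : (0:Int) < s) i).mp hi with ⟨h1, _, _⟩
      exact h1
    simp only [Function.comp_apply]
    rw [PySem.List.slice_toNat _ (by omega) (by omega), PySem.List.slice_toNat _ (by omega) (by omega)]
    rw [List.drop_drop]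
    congr 1
    · omega
    · congr 1
      omega

-- B's fold invariant: from state (res, cur) with cur shorter than a chunk,
-- the finished result is res ++ A's chunking of (cur ++ l).
lemma B_inv (s : Int) (hs : 1 ≤ s) (l : List Int) :
    ∀ (res : List (List Int)) (cur : List Int), cur.length < s.toNat →
      (let st := l.foldl
          (fun (acc : List (List Int) × List Int) item =>
            let current := acc.2 ++ [item]
            if (current.length : Int) = s then (acc.1 ++ [current], ([] : List Int))
            else (acc.1, current))
          (res, cur)
       if st.2 = [] then st.1 else st.1 ++ [st.2]) = res ++ get_paginated_lists s (cur ++ l) := by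
  induction l with
  | nil =>
    intro res cur hcur
    simp only [List.foldl_nil, List.append_nil]
    by_cases hc : cur = []
    · subst hc
      simp [A_nil s hs]
    · rw [if_neg hc, A_rec s hs cur hc]
      have h1 : cur.take s.toNat = cur := List.take_of_length_le (by omega)
      have h2 : cur.drop s.toNat = [] := List.drop_eq_nil_of_le (by omega)
      rw [h1, h2, A_nil s hs]
  | cons x l ih =>
    intro res cur hcur
    simp only [List.foldl_cons]
    by_cases h : ((cur ++ [x]).length : Int) = s
    · rw [if_pos h]
      rw [ih (res ++ [cur ++ [x]]) [] (by simp; omega)]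
      have hrec := A_rec s hs ((cur ++ [x]) ++ l) (by simp)
      have hlen : (cur ++ [x]).length = s.toNat := by omega
      rw [List.take_left' hlen, List.drop_left' hlen] at hrec
      rw [show cur ++ x :: l = (cur ++ [x]) ++ l from by simp, hrec]
      simp
    · rw [if_neg h]
      have hlt : (cur ++ [x]).length < s.toNat := by
        simp only [List.length_append, List.length_cons, List.length_nil] at *
        omega
      rw [ih res (cur ++ [x]) hlt]
      congr 1
      simp

-- ===== VERDICT (by name: the statement is the Claim_ definition above) =====
theorem get_paginated_lists_spec : Claim_equal_get_paginated_lists := by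
  intro s l _ hpre
  have hs : 1 ≤ s := hpre
  unfold Spec_get_paginated_lists get_paginated_lists_alt
  have h := B_inv s hs l [] [] (by simp only [List.length_nil]; omega)
  simp only [List.nil_append] at h
  exact h.symm
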